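-- pv_equiv track=rewrite | github.com/28530367/gene | Django_gene/web_tool/math.py | utr_cds_ranges
-- ===== SOURCE A (Python) =====
-- def utr_cds_ranges(sequence):
--     count = 0
--     ranges = []
--     End = []
--     Start = [1]
--     five_utr = sequence[0].islower()
--     three_utr = sequence[-1].islower()
--
--     if five_utr and three_utr:
--         index = [1, 2 ,1]
--     elif five_utr:
--         index = [1, 2]
--     else:
--         index = [2, 1]
--
--     first = sequence[0].islower()
--     for i in sequence:
--         count += 1
--         if not first == i.islower():
--             first = i.islower()
--             End.append(count-1)
--             Start.append(count)
--         else: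
--             continue
--     End.append(count)
--
--     for i in range(len(Start)):
--         ranges.append([Start[i], End[i]])
--
--     return ranges,index
-- ===== SOURCE B (Python) =====
-- def utr_cds_ranges(sequence):
--     five_utr = sequence[0].islower()
--     three_utr = sequence[-1].islower()
--     if five_utr and three_utr:
--         index = [1, 2, 1]
--     elif five_utr:
--         index = [1, 2]
--     else:
--         index = [2, 1]
--     ranges = []
--     pos = 1
--     rest = sequence
--     while rest:
--         k = rest[0].islower()
--         run = 1
--         for ch in rest[1:]:
--             if ch.islower() == k:
--                 run += 1
--             else:
--                 break
--         ranges.append([pos, pos + run - 1])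
--         pos += run
--         rest = rest[run:]
--     return ranges, index
-- ===== Notes on version B (the rewrite author's own statement) =====
-- stated objective: alternative
-- what changed: Replaces the counter-plus-transition-flag loop that builds parallel Start/End lists and then zips them by index with a run-based scan that slices off each maximal same-case run and emits its [start, end] range directly.
import Mathlib
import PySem

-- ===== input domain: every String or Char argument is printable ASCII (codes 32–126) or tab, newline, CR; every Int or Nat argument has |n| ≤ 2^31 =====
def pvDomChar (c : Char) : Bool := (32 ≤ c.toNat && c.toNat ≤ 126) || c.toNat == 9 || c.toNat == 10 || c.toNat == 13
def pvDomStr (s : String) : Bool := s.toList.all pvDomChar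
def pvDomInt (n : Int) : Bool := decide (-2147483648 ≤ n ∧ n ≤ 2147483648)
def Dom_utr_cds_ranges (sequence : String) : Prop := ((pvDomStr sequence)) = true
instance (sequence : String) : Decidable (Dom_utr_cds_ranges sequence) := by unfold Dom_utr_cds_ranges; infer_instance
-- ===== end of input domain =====

-- B replaces A's counter/transition-flag loop (parallel Start/End lists zipped by index)
-- with a run-based scan that slices off each maximal same-case run and emits its range directly.

-- ===== PORT A =====
-- one iteration of A's for-loop, state = (count, first, End, Start)
def pvLoopStepA (st : Int × Bool × List Int × List Int) (i : Char) : Int × Bool × List Int × List Int :=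
  let count := st.1 + 1
  if !(st.2.1 == PySem.Chars.islower i) then
    (count, PySem.Chars.islower i, st.2.2.1 ++ [count - 1], st.2.2.2 ++ [count])
  else
    (count, st.2.1, st.2.2.1, st.2.2.2)

def utr_cds_ranges (sequence : String) : List (List Int) × List Int :=
  let cs := sequence.toList
  -- sequence[0] / sequence[-1]: in range by Pre_ (sequence ≠ ""); the getD default is never taken
  let five_utr := PySem.Chars.islower ((PySem.List.pyGet? cs 0).getD ' ')
  let three_utr := PySem.Chars.islower ((PySem.List.pyGet? cs (-1)).getD ' ')
  let index : List Int :=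
    if five_utr && three_utr then [1, 2, 1]
    else if five_utr then [1, 2]
    else [2, 1]
  let first := PySem.Chars.islower ((PySem.List.pyGet? cs 0).getD ' ')
  let r := cs.foldl pvLoopStepA (0, first, [], [1])
  let count := r.1
  let endL := r.2.2.1 ++ [count]
  let startL := r.2.2.2
  -- for i in range(len(Start)): Start[i], End[i] are in range (the lists end up equal-length); getD never taken
  let ranges := (PySem.List.pyRange 0 (startL.length) 1).foldl
    (fun acc i => acc ++ [[(PySem.List.pyGet? startL i).getD 0, (PySem.List.pyGet? endL i).getD 0]]) []
  (ranges, index)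

-- ===== PORT B =====
-- inner for-loop of Source B: how many leading chars of rest[1:] have islower() == k before the break
def pvMatchLen (k : Bool) : List Char → Nat
  | [] => 0
  | c :: t => if PySem.Chars.islower c == k then pvMatchLen k t + 1 else 0

-- outer while-loop of Source B over (rest, pos), emitting one [start, end] per maximal same-case run
def pvRunsB : List Char → Int → List (List Int)
  | [], _ => []
  | c :: t, pos =>
    let run : Nat := 1 + pvMatchLen (PySem.Chars.islower c) t
    [pos, pos + (run : Int) - 1] :: pvRunsB ((c :: t).drop run) (pos + (run : Int))
termination_by l _ => l.length
decreasing_by simp [List.length_drop]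

def utr_cds_ranges_alt (sequence : String) : List (List Int) × List Int :=
  let cs := sequence.toList
  let five_utr := PySem.Chars.islower ((PySem.List.pyGet? cs 0).getD ' ')
  let three_utr := PySem.Chars.islower ((PySem.List.pyGet? cs (-1)).getD ' ')
  let index : List Int :=
    if five_utr && three_utr then [1, 2, 1]
    else if five_utr then [1, 2]
    else [2, 1]
  (pvRunsB cs 1, index)

-- ===== PRECONDITION & SPEC =====
-- A raises IndexError on the empty string (sequence[0]); excluded.
def Pre_utr_cds_ranges (sequence : String) : Prop := sequence ≠ ""
instance (sequence : String) : Decidable (Pre_utr_cds_ranges sequence) := by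
  unfold Pre_utr_cds_ranges; infer_instance
def pvWitness_utr_cds_ranges : String := "atgGCGtaa"

def Spec_utr_cds_ranges (sequence : String) (out : List (List Int) × List Int) : Prop := out = utr_cds_ranges_alt sequence
instance (sequence : String) (out : List (List Int) × List Int) : Decidable (Spec_utr_cds_ranges sequence out) := by unfold Spec_utr_cds_ranges; infer_instance

-- ===== CLAIM (what is proved, stated in full; the proofs are below) =====
def Claim_equal_utr_cds_ranges : Prop := ∀ (sequence : String), Dom_utr_cds_ranges sequence → Pre_utr_cds_ranges sequence → Spec_utr_cds_ranges sequence (utr_cds_ranges sequence)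

-- ===== LEMMAS AND PROOFS =====

-- proof-side view of the runs: (start, end) pairs, 1-based inclusive
def pvRunsP : List Char → Int → List (Int × Int)
  | [], _ => []
  | c :: t, pos =>
    let m := pvMatchLen (PySem.Chars.islower c) t
    (pos, pos + (m : Int)) :: pvRunsP (t.drop m) (pos + (m : Int) + 1)
termination_by l _ => l.length
decreasing_by simp [List.length_drop]

theorem pvRunsP_nil (pos : Int) : pvRunsP [] pos = [] := by rw [pvRunsP.eq_def]

theorem pvRunsP_cons (c : Char) (t : List Char) (pos : Int) :
    pvRunsP (c :: t) pos = (pos, pos + (pvMatchLen (PySem.Chars.islower c) t : Int)) ::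
      pvRunsP (t.drop (pvMatchLen (PySem.Chars.islower c) t))
        (pos + (pvMatchLen (PySem.Chars.islower c) t : Int) + 1) := by
  rw [pvRunsP.eq_def]

theorem pvRunsB_nil (pos : Int) : pvRunsB [] pos = [] := by rw [pvRunsB.eq_def]

theorem pvRunsB_cons (c : Char) (t : List Char) (pos : Int) :
    pvRunsB (c :: t) pos =
      [pos, pos + ((1 + pvMatchLen (PySem.Chars.islower c) t : Nat) : Int) - 1] ::
        pvRunsB ((c :: t).drop (1 + pvMatchLen (PySem.Chars.islower c) t))
          (pos + ((1 + pvMatchLen (PySem.Chars.islower c) t : Nat) : Int)) := by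
  rw [pvRunsB.eq_def]

theorem pvMatchLen_le (k : Bool) (t : List Char) : pvMatchLen k t ≤ t.length := by
  induction t with
  | nil => simp [pvMatchLen]
  | cons c t ih => simp only [pvMatchLen, List.length_cons]; split_ifs <;> omega

theorem pvMem_take_matchLen (k : Bool) (t : List Char) :
    ∀ x ∈ t.take (pvMatchLen k t), (PySem.Chars.islower x == k) = true := by
  induction t with
  | nil => simp
  | cons c t ih =>
    simp only [pvMatchLen]
    split_ifs with h
    · intro x hx
      rcases List.mem_cons.mp (by simpa using hx) with rfl | hx'
      · exact h
      · exact ih x hx'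
    · simp

theorem pvHead_drop_matchLen (k : Bool) (t : List Char) (d : Char) (t3 : List Char)
    (h : t.drop (pvMatchLen k t) = d :: t3) : (PySem.Chars.islower d == k) = false := by
  induction t generalizing d t3 with
  | nil => simp at h
  | cons c t ih =>
    simp only [pvMatchLen] at h
    by_cases hc : (PySem.Chars.islower c == k) = true
    · rw [if_pos hc] at h
      exact ih d t3 (by simpa using h)
    · rw [if_neg hc] at h
      simp only [List.drop_zero] at h
      injection h with h1 h2
      subst h1
      simpa using hc

theorem pvRunSkip (t1 : List Char) (k : Bool) (E S : List Int)
    (h : ∀ x ∈ t1, (PySem.Chars.islower x == k) = true) (count : Int) :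
    t1.foldl pvLoopStepA (count, k, E, S) = (count + t1.length, k, E, S) := by
  induction t1 generalizing count with
  | nil => simp
  | cons c t ih =>
    have hc : (PySem.Chars.islower c == k) = true := h c (List.mem_cons_self ..)
    have hk : (k == PySem.Chars.islower c) = true := by
      have := eq_of_beq hc; simp [this]
    simp only [List.foldl_cons, pvLoopStepA, hk, Bool.not_true, if_neg, Bool.false_eq_true,
      not_false_eq_true]
    rw [ih (fun x hx => h x (List.mem_cons_of_mem _ hx)) (count + 1)]
    simp only [List.length_cons, Prod.mk.injEq]
    refine ⟨by push_cast; ring, trivial⟩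

-- main invariant: A's loop over ch :: t, started with first = islower ch, appends exactly the
-- run boundaries described by pvRunsP (all ends but the last to End, all starts but the first to Start)
theorem pvLoopMain : ∀ (n : Nat) (ch : Char) (t : List Char), t.length < n →
    ∀ (c : Int) (E S : List Int), ∃ b,
    (ch :: t).foldl pvLoopStepA (c, PySem.Chars.islower ch, E, S) =
      (c + (ch :: t).length, b,
       E ++ ((pvRunsP (ch :: t) (c + 1)).map Prod.snd).dropLast,
       S ++ ((pvRunsP (ch :: t) (c + 1)).map Prod.fst).tail) := by
  intro n
  induction n with
  | zero => intro ch t h; omega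
  | succ n ih =>
    intro ch t ht c E S
    set k := PySem.Chars.islower ch with hk
    set m := pvMatchLen k t with hm
    have hmle : m ≤ t.length := pvMatchLen_le k t
    have hsplit : t.take m ++ t.drop m = t := List.take_append_drop m t
    have hlen_take : (t.take m).length = m := by
      simp [List.length_take]; omega
    have step1 : (ch :: t).foldl pvLoopStepA (c, k, E, S) =
        t.foldl pvLoopStepA (c + 1, k, E, S) := by
      simp [pvLoopStepA, hk]
    have step2 : t.foldl pvLoopStepA (c + 1, k, E, S) =
        (t.drop m).foldl pvLoopStepA (c + 1 + m, k, E, S) := by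
      conv_lhs => rw [← hsplit]
      rw [List.foldl_append, pvRunSkip _ _ _ _ (pvMem_take_matchLen k t)]
      rw [hlen_take]
    rcases hdrop : t.drop m with _ | ⟨d, t3⟩
    · -- single run
      refine ⟨k, ?_⟩
      rw [step1, step2, hdrop]
      have hmt : m = t.length := by
        have := congrArg List.length hdrop
        simp [List.length_drop] at this
        omega
      rw [pvRunsP_cons, ← hk, ← hm, hdrop, pvRunsP_nil]
      simp [hmt]
      ring
    · -- boundary, then recurse on the rest
      have hd : (PySem.Chars.islower d == k) = false := pvHead_drop_matchLen k t d t3 hdrop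
      have hkd : (k == PySem.Chars.islower d) = false := by
        cases hx : PySem.Chars.islower d <;> cases hy : k <;> simp_all
      have step3 : (d :: t3).foldl pvLoopStepA (c + 1 + m, k, E, S) =
          t3.foldl pvLoopStepA (c + 1 + m + 1, PySem.Chars.islower d,
            E ++ [c + 1 + m], S ++ [c + 1 + m + 1]) := by
      -- one unfolding: the changed-flag branch fires
        simp only [List.foldl_cons, pvLoopStepA, hkd, Bool.not_false, if_pos]
        norm_num
      have step4 : (d :: t3).foldl pvLoopStepA (c + 1 + m, PySem.Chars.islower d,
            E ++ [c + 1 + m], S ++ [c + 1 + m + 1]) =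
          t3.foldl pvLoopStepA (c + 1 + m + 1, PySem.Chars.islower d,
            E ++ [c + 1 + m], S ++ [c + 1 + m + 1]) := by
        simp [pvLoopStepA]
      have ht3 : t3.length < n := by
        have := congrArg List.length hdrop
        simp [List.length_drop] at this
        omega
      obtain ⟨b, hb⟩ := ih d t3 ht3 (c + 1 + m) (E ++ [c + 1 + m]) (S ++ [c + 1 + m + 1])
      rw [step4] at hb
      refine ⟨b, ?_⟩
      rw [step1, step2, hdrop, step3, hb]
      have hruns : pvRunsP (ch :: t) (c + 1) =
          (c + 1, c + 1 + (m : Int)) :: pvRunsP (d :: t3) (c + 1 + (m : Int) + 1) := by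
        rw [pvRunsP_cons, ← hk, ← hm, hdrop]
      have hne : pvRunsP (d :: t3) (c + 1 + (m : Int) + 1) ≠ [] := by
        rw [pvRunsP_cons]; simp
      obtain ⟨q, rest, hq⟩ : ∃ q rest,
          pvRunsP (d :: t3) (c + 1 + (m : Int) + 1) = (c + 1 + (m : Int) + 1, q) :: rest :=
        ⟨_, _, pvRunsP_cons d t3 _⟩
      have hhd : (pvRunsP (d :: t3) (c + 1 + (m : Int) + 1)).map Prod.fst =
          (c + 1 + (m : Int) + 1) :: ((pvRunsP (d :: t3) (c + 1 + (m : Int) + 1)).map Prod.fst).tail := by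
        rw [hq]
        simp
      have hlenrw : c + 1 + (m : Int) + (d :: t3).length = c + (ch :: t).length := by
        have := congrArg List.length hdrop
        simp [List.length_drop] at this
        simp only [List.length_cons]
        push_cast
        omega
      have hE : E ++ [c + 1 + (m : Int)] ++
            ((pvRunsP (d :: t3) (c + 1 + (m : Int) + 1)).map Prod.snd).dropLast =
          E ++ (((c + 1, c + 1 + (m : Int)) ::
            pvRunsP (d :: t3) (c + 1 + (m : Int) + 1)).map Prod.snd).dropLast := by
        rw [List.map_cons, List.dropLast_cons_of_ne_nil (by simpa using hne), List.append_assoc]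
        rfl
      have hS : S ++ [c + 1 + (m : Int) + 1] ++
            ((pvRunsP (d :: t3) (c + 1 + (m : Int) + 1)).map Prod.fst).tail =
          S ++ (((c + 1, c + 1 + (m : Int)) ::
            pvRunsP (d :: t3) (c + 1 + (m : Int) + 1)).map Prod.fst).tail := by
        rw [List.map_cons, List.tail_cons]
        conv_rhs => rw [hhd]
        rw [List.append_assoc]
        rfl
      rw [hruns, hlenrw, hE, hS]

-- appending the final count completes the ends list
theorem pvEndsConcat : ∀ (n : Nat) (ch : Char) (t : List Char), t.length < n → ∀ (pos : Int),
    ((pvRunsP (ch :: t) pos).map Prod.snd).dropLast ++ [pos + (ch :: t).length - 1] =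
      (pvRunsP (ch :: t) pos).map Prod.snd := by
  intro n
  induction n with
  | zero => intro ch t h; omega
  | succ n ih =>
    intro ch t ht pos
    set k := PySem.Chars.islower ch with hk
    set m := pvMatchLen k t with hm
    rcases hdrop : t.drop m with _ | ⟨d, t3⟩
    · have hmt : m = t.length := by
        have := congrArg List.length hdrop
        simp [List.length_drop] at this
        have := pvMatchLen_le k t
        omega
      rw [pvRunsP_cons, ← hk, ← hm, hdrop, pvRunsP_nil]
      simp [hmt]
      ring
    · have ht3 : t3.length < n := by
        have := congrArg List.length hdrop
        simp [List.length_drop] at this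
        omega
      rw [pvRunsP_cons, ← hk, ← hm, hdrop]
      rw [List.map_cons]
      rw [List.dropLast_cons_of_ne_nil (by rw [pvRunsP_cons]; simp)]
      rw [List.cons_append]
      congr 1
      have := ih d t3 ht3 (pos + (m : Int) + 1)
      rw [← this]
      congr 2
      have hlen := congrArg List.length hdrop
      simp [List.length_drop] at hlen
      simp only [List.length_cons]
      push_cast
      omega

-- B's port computes the [start, end] image of pvRunsP
theorem pvRunsB_eq : ∀ (n : Nat) (l : List Char), l.length ≤ n → ∀ (pos : Int),
    pvRunsB l pos = (pvRunsP l pos).map (fun p => [p.1, p.2]) := by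
  intro n
  induction n with
  | zero =>
    intro l h pos
    have : l = [] := List.length_eq_zero_iff.mp (by omega)
    subst this
    simp [pvRunsB_nil, pvRunsP_nil]
  | succ n ih =>
    intro l h pos
    rcases l with _ | ⟨c, t⟩
    · simp [pvRunsB_nil, pvRunsP_nil]
    · rw [pvRunsB_cons, pvRunsP_cons, List.map_cons]
      set m := pvMatchLen (PySem.Chars.islower c) t with hm
      have hdrop : (c :: t).drop (1 + m) = t.drop m := by
        rw [Nat.add_comm 1 m]
        simp [List.drop_succ_cons]
      have hhead : [pos, pos + ((1 + m : Nat) : Int) - 1] = [pos, pos + (m : Int)] := by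
        rw [show pos + ((1 + m : Nat) : Int) - 1 = pos + (m : Int) by push_cast; ring]
      have hpos : pos + ((1 + m : Nat) : Int) = pos + (m : Int) + 1 := by push_cast; ring
      rw [hhead, hdrop, hpos, ih (t.drop m) (by simp [List.length_drop] at *; omega)]

-- the index-zipping loop over range(len(S)) equals zip-and-map, for equal-length lists
theorem pvZipLoop (S E : List Int) (h : S.length = E.length) :
    (PySem.List.pyRange 0 (S.length) 1).foldl
      (fun acc i => acc ++ [[(PySem.List.pyGet? S i).getD 0, (PySem.List.pyGet? E i).getD 0]]) [] =
    (S.zip E).map (fun p => [p.1, p.2]) := by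
  have hfold : ∀ (g : Int → List Int) (n : Nat) (acc : List (List Int)),
      (List.range n).foldl (fun (a : List (List Int)) (k : Nat) => a ++ [g (k : Int)]) acc =
        acc ++ (List.range n).map (fun (k : Nat) => g (k : Int)) := by
    intro g n
    induction n with
    | zero => simp
    | succ n ihn =>
      intro acc
      rw [List.range_succ, List.foldl_append, ihn, List.map_append]
      simp
  have hrange : PySem.List.pyRange 0 (S.length) 1 =
      (List.range S.length).map (fun (k : Nat) => (k : Int)) := by
    rw [PySem.List.pyRange_one]
    simp
  rw [hrange, List.foldl_map]
  rw [hfold (fun i => [(PySem.List.pyGet? S i).getD 0, (PySem.List.pyGet? E i).getD 0]) S.length []]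
  rw [List.nil_append]
  apply List.ext_getElem
  · simp [h]
  · intro i h1 h2
    simp only [List.getElem_map, List.getElem_range, List.getElem_zip]
    rw [PySem.List.pyGet?_natCast, PySem.List.pyGet?_natCast]
    simp at h1
    rw [List.getElem?_eq_getElem (by omega), List.getElem?_eq_getElem (by omega)]
    simp

-- ===== VERDICT (by name: the statement is the Claim_ definition above) =====
theorem utr_cds_ranges_spec : Claim_equal_utr_cds_ranges := by
  intro sequence _ hpre
  unfold Spec_utr_cds_ranges
  unfold Pre_utr_cds_ranges at hpre
  rcases hl : sequence.toList with _ | ⟨ch, t⟩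
  · exact absurd (by have := congrArg String.ofList hl; simpa using this) hpre
  · simp only [utr_cds_ranges, utr_cds_ranges_alt, hl]
    have hget0 : (PySem.List.pyGet? (ch :: t) 0).getD ' ' = ch := by
      rw [show (0 : Int) = ((0 : Nat) : Int) from rfl, PySem.List.pyGet?_natCast]
      rfl
    rw [hget0]
    obtain ⟨b, hb⟩ := pvLoopMain (t.length + 1) ch t (by omega) 0 [] [1]
    rw [show (0 : Int) + 1 = 1 by ring] at hb
    rw [hb]
    dsimp only
    congr 1
    have hstart : [(1 : Int)] ++ ((pvRunsP (ch :: t) 1).map Prod.fst).tail =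
        (pvRunsP (ch :: t) 1).map Prod.fst := by
      rw [pvRunsP_cons]
      simp
    have hend : ([] ++ ((pvRunsP (ch :: t) 1).map Prod.snd).dropLast) ++ [(0 : Int) + (ch :: t).length] =
        (pvRunsP (ch :: t) 1).map Prod.snd := by
      rw [List.nil_append]
      have := pvEndsConcat (t.length + 1) ch t (by omega) 1
      rw [← this]
      congr 2
      ring
    rw [hstart, hend]
    have hlen : ((pvRunsP (ch :: t) 1).map Prod.fst).length =
        ((pvRunsP (ch :: t) 1).map Prod.snd).length := by simp
    rw [pvZipLoop _ _ hlen, List.zip_map']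
    rw [pvRunsB_eq ((ch :: t).length) (ch :: t) le_rfl 1]
    simp
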